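-- pv_equiv track=rewrite | github.com/i-krishna/Business-Analytics | Hackathons/HackerRank/calculateTotalRegion.py | calculateTotalRegion
-- ===== SOURCE A (Python) =====
-- def calculateTotalRegion(heights):
--     n = len(heights)
--     left = [-1] * n
--     right = [n] * n
--
--     # Monotonic stack for left boundary
--     stack = []
--     for i in range(n):
--         while stack and heights[stack[-1]] <= heights[i]:
--             stack.pop()
--         if stack:
--             left[i] = stack[-1]
--         stack.append(i)
--
--     # Monotonic stack for right boundary
--     stack = []
--     for i in range(n-1, -1, -1):
--         while stack and heights[stack[-1]] <= heights[i]: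
--             stack.pop()
--         if stack:
--             right[i] = stack[-1]
--         stack.append(i)
--
--     total = 0
--     for i in range(n):
--         total += right[i] - left[i] - 1
--
--     return total
-- ===== SOURCE B (Python) =====
-- def calculateTotalRegion(heights):
--     n = len(heights)
--     total = 0
--     for i in range(n):
--         j = i - 1
--         while j >= 0 and heights[j] <= heights[i]:
--             j -= 1
--         k = i + 1
--         while k < n and heights[k] <= heights[i]:
--             k += 1
--         total += k - j - 1
--     return total
-- ===== Notes on version B (the rewrite author's own statement) =====
-- stated objective: simpler
-- what changed: Replaced the two monotonic-stack passes and the left/right boundary arrays with direct per-index linear scans (leftward and rightward to the nearest strictly greater element), accumulating the span width in a single loop with no auxiliary arrays or stacks.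
import Mathlib
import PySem

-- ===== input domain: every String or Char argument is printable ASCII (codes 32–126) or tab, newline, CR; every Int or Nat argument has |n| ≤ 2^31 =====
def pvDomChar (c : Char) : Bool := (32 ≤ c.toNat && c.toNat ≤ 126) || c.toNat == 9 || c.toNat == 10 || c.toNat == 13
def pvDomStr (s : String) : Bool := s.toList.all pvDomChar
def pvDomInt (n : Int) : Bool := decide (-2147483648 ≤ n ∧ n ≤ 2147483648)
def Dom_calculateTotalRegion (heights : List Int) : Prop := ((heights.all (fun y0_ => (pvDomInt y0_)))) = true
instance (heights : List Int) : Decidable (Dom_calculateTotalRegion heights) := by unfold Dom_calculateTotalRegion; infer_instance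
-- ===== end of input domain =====

-- B replaces the two monotonic-stack passes and boundary arrays of A with direct per-index
-- scans to the nearest strictly greater element on each side (simpler, no auxiliary state).

-- ===== PORT A =====
-- heights[j]; every access in A/B is in range, so the default is never used
def hgetA (h : List Int) (j : Nat) : Int := h.getD j 0

-- 'while stack and heights[stack[-1]] <= heights[i]: stack.pop()' (stack top at head)
def popLe (h : List Int) (hi : Int) : List Nat → List Nat
  | [] => []
  | j :: st => if hgetA h j ≤ hi then popLe h hi st else j :: st

-- one iteration of either stack loop: pop, record boundary into the array, push i
def stackStep (h : List Int) (s : List Nat × List Int) (i : Nat) : List Nat × List Int :=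
  let st := popLe h (hgetA h i) s.1
  let arr := match st with
    | [] => s.2
    | j :: _ => s.2.set i (j : Int)
  (i :: st, arr)

def calculateTotalRegion (heights : List Int) : Int :=
  let n := heights.length
  let left0 : List Int := List.replicate n (-1)
  let right0 : List Int := List.replicate n (n : Int)
  let lft := ((List.range n).foldl (stackStep heights) ([], left0)).2
  let rgt := (((List.range n).reverse).foldl (stackStep heights) ([], right0)).2
  (List.range n).foldl (fun t i => t + (rgt.getD i 0 - lft.getD i 0 - 1)) 0

-- ===== PORT B =====
-- 'j = i - 1; while j >= 0 and heights[j] <= heights[i]: j -= 1'; argument is j+1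
def scanL (h : List Int) (hi : Int) : Nat → Int
  | 0 => -1
  | j + 1 => if hgetA h j ≤ hi then scanL h hi j else (j : Int)

-- 'k = i + 1; while k < n and heights[k] <= heights[i]: k += 1'
def scanR (h : List Int) (hi : Int) (n : Nat) (k : Nat) : Int :=
  if k < n then (if hgetA h k ≤ hi then scanR h hi n (k + 1) else (k : Int)) else (n : Int)
termination_by n - k

def calculateTotalRegion_alt (heights : List Int) : Int :=
  let n := heights.length
  (List.range n).foldl
    (fun t i => t + (scanR heights (hgetA heights i) n (i + 1) - scanL heights (hgetA heights i) i - 1)) 0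

-- ===== PRECONDITION & SPEC =====
def Spec_calculateTotalRegion (heights : List Int) (out : Int) : Prop := out = calculateTotalRegion_alt heights
instance (heights : List Int) (out : Int) : Decidable (Spec_calculateTotalRegion heights out) := by unfold Spec_calculateTotalRegion; infer_instance

-- ===== CLAIM (what is proved, stated in full; the proofs are below) =====
def Claim_equal_calculateTotalRegion : Prop := ∀ (heights : List Int), Dom_calculateTotalRegion heights → Spec_calculateTotalRegion heights (calculateTotalRegion heights)

-- ===== LEMMAS AND PROOFS =====

-- canonical stacks: T h m = stack after A's first loop has processed 0..m-1;
-- T' h n i = stack after A's second loop has processed n-1..i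
def stkL (h : List Int) : Nat → List Nat
  | 0 => []
  | m + 1 => m :: popLe h (hgetA h m) (stkL h m)

def stkR (h : List Int) (n : Nat) (i : Nat) : List Nat :=
  if i < n then i :: popLe h (hgetA h i) (stkR h n (i + 1)) else []
termination_by n - i

def firstL : List Nat → Int
  | [] => -1
  | j :: _ => (j : Int)

def firstR (n : Nat) : List Nat → Int
  | [] => (n : Int)
  | j :: _ => (j : Int)

theorem popLe_popLe (h : List Int) (x y : Int) (hxy : y ≤ x) (l : List Nat) :
    popLe h x (popLe h y l) = popLe h x l := by
  induction l with
  | nil => rfl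
  | cons j st ih =>
    simp only [popLe]
    by_cases hj : hgetA h j ≤ y
    · rw [if_pos hj, ih, if_pos (le_trans hj hxy)]
    · rw [if_neg hj, popLe]

theorem keyL (h : List Int) (x : Int) (m : Nat) :
    firstL (popLe h x (stkL h m)) = scanL h x m := by
  induction m with
  | zero => rfl
  | succ m ih =>
    simp only [stkL, popLe, scanL]
    by_cases hm : hgetA h m ≤ x
    · rw [if_pos hm, if_pos hm, popLe_popLe h x (hgetA h m) hm, ih]
    · rw [if_neg hm, if_neg hm]; rfl

theorem keyR (h : List Int) (x : Int) (n : Nat) (i : Nat) :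
    firstR n (popLe h x (stkR h n i)) = scanR h x n i := by
  by_cases hi : i < n
  · rw [stkR, if_pos hi, scanR, if_pos hi]
    simp only [popLe]
    by_cases hx : hgetA h i ≤ x
    · rw [if_pos hx, if_pos hx, popLe_popLe h x (hgetA h i) hx]
      exact keyR h x n (i + 1)
    · rw [if_neg hx, if_neg hx]; rfl
  · rw [stkR, if_neg hi, scanR, if_neg hi]; rfl
termination_by n - i

-- unfolding lemma for the (well-founded) right stack
theorem stkR_lt (h : List Int) (n i : Nat) (hi : i < n) :
    stkR h n i = i :: popLe h (hgetA h i) (stkR h n (i + 1)) := by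
  rw [stkR, if_pos hi]

theorem stkR_end (h : List Int) (n : Nat) : stkR h n n = [] := by
  rw [stkR, if_neg (lt_irrefl n)]

-- left-pass invariant
theorem leftInv (h : List Int) (n : Nat) (m : Nat) (arr : List Int)
    (hlen : arr.length = n)
    (harr : ∀ i, i < n → arr.getD i 0 = if i < m then scanL h (hgetA h i) i else -1)
    (hm : m ≤ n) :
    ∀ i, i < n →
      ((List.range' m (n - m)).foldl (stackStep h) (stkL h m, arr)).2.getD i 0 =
        scanL h (hgetA h i) i := by
  induction hn : n - m generalizing m arr with
  | zero =>
    have hmn : m = n := by omega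
    subst hmn
    simp only [List.range'_zero, List.foldl_nil]
    intro i hi
    rw [harr i hi, if_pos hi]
  | succ k ih =>
    have hmlt : m < n := by omega
    rw [List.range'_succ, List.foldl_cons]
    have hstep : stackStep h (stkL h m, arr) m =
        (stkL h (m + 1), match popLe h (hgetA h m) (stkL h m) with
          | [] => arr
          | j :: _ => arr.set m (j : Int)) := by
      simp only [stackStep, stkL]
    rw [hstep]
    set arr' : List Int := (match popLe h (hgetA h m) (stkL h m) with
          | [] => arr
          | j :: _ => arr.set m (j : Int)) with harr'
    have hlen' : arr'.length = n := by
      rw [harr']; cases popLe h (hgetA h m) (stkL h m) <;> simp [hlen]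
    have hgd : ∀ i, i < n → arr'.getD i 0 =
        if i < m + 1 then scanL h (hgetA h i) i else -1 := by
      intro i hi
      by_cases him : i = m
      · subst him
        have hkey := keyL h (hgetA h i) i
        rw [harr', if_pos (by omega)]
        cases hc : popLe h (hgetA h i) (stkL h i) with
        | nil => rw [harr i hi, if_neg (by omega), ← hkey, hc]; rfl
        | cons j st =>
          rw [← hkey, hc]
          simp only [firstL]
          rw [List.getD_eq_getElem?_getD, List.getElem?_set_self (by omega)]
          simp
      · have heq : arr'.getD i 0 = arr.getD i 0 := by
          rw [harr']
          cases popLe h (hgetA h m) (stkL h m) with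
          | nil => rfl
          | cons j st =>
            simp only [List.getD_eq_getElem?_getD]
            rw [List.getElem?_set_ne (by omega)]
        rw [heq, harr i hi]
        by_cases h1 : i < m
        · rw [if_pos h1, if_pos (by omega)]
        · rw [if_neg h1, if_neg (by omega)]
    have hres := ih (m + 1) arr' hlen' hgd (by omega) (by omega)
    convert hres using 4

theorem leftArr_spec (h : List Int) (n : Nat) :
    ∀ i, i < n →
      (((List.range n).foldl (stackStep h) ([], List.replicate n (-1))).2).getD i 0 =
        scanL h (hgetA h i) i := by
  intro i hi
  have H := leftInv h n 0 (List.replicate n (-1)) (by simp)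
    (by intro j hj
        rw [if_neg (by omega), List.getD_eq_getElem?_getD, List.getElem?_replicate,
          if_pos hj]
        rfl)
    (Nat.zero_le n) i hi
  simpa [List.range_eq_range', stkL, Nat.sub_zero] using H

-- right-pass invariant: fold over i-1, i-2, …, 0 (the reversed range of i)
theorem rightInv (h : List Int) (n : Nat) (i : Nat) (arr : List Int)
    (hlen : arr.length = n)
    (harr : ∀ j, j < n → arr.getD j 0 =
        if i ≤ j then scanR h (hgetA h j) n (j + 1) else (n : Int))
    (hi : i ≤ n) :
    ∀ j, j < n →
      (((List.range i).reverse).foldl (stackStep h) (stkR h n i, arr)).2.getD j 0 =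
        scanR h (hgetA h j) n (j + 1) := by
  induction i generalizing arr with
  | zero =>
    simp only [List.range_zero, List.reverse_nil, List.foldl_nil]
    intro j hj
    rw [harr j hj, if_pos (Nat.zero_le j)]
  | succ i ih =>
    rw [List.range_succ, List.reverse_append, List.reverse_singleton, List.singleton_append,
      List.foldl_cons]
    have hstep : stackStep h (stkR h n (i + 1), arr) i =
        (stkR h n i, match popLe h (hgetA h i) (stkR h n (i + 1)) with
          | [] => arr
          | j :: _ => arr.set i (j : Int)) := by
      simp only [stackStep]
      rw [stkR_lt h n i (by omega)]
    rw [hstep]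
    set arr' : List Int := (match popLe h (hgetA h i) (stkR h n (i + 1)) with
          | [] => arr
          | j :: _ => arr.set i (j : Int)) with harr'
    have hlen' : arr'.length = n := by
      rw [harr']; cases popLe h (hgetA h i) (stkR h n (i + 1)) <;> simp [hlen]
    apply ih arr' hlen' _ (by omega)
    intro j hj
    by_cases hji : j = i
    · subst hji
      have hkey := keyR h (hgetA h j) n (j + 1)
      rw [harr', if_pos (le_refl j)]
      cases hc : popLe h (hgetA h j) (stkR h n (j + 1)) with
      | nil => rw [harr j hj, if_neg (by omega), ← hkey, hc]; rfl
      | cons x st =>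
        rw [← hkey, hc]
        simp only [firstR]
        rw [List.getD_eq_getElem?_getD, List.getElem?_set_self (by omega)]
        simp
    · have heq : arr'.getD j 0 = arr.getD j 0 := by
        rw [harr']
        cases popLe h (hgetA h i) (stkR h n (i + 1)) with
        | nil => rfl
        | cons x st =>
          simp only [List.getD_eq_getElem?_getD]
          rw [List.getElem?_set_ne (by omega)]
      rw [heq, harr j hj]
      by_cases h1 : i ≤ j
      · rw [if_pos h1, if_pos (by omega)]
      · rw [if_neg h1, if_neg (by omega)]

theorem rightArr_spec (h : List Int) (n : Nat) :
    ∀ j, j < n →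
      ((((List.range n).reverse).foldl (stackStep h) ([], List.replicate n (n : Int))).2).getD j 0 =
        scanR h (hgetA h j) n (j + 1) := by
  intro j hj
  have H := rightInv h n n (List.replicate n (n : Int)) (by simp)
    (by intro j' hj'
        rw [if_neg (by omega), List.getD_eq_getElem?_getD, List.getElem?_replicate,
          if_pos hj']
        rfl)
    (le_refl n) j hj
  rw [stkR_end] at H
  exact H

-- ===== VERDICT (by name: the statement is the Claim_ definition above) =====
theorem calculateTotalRegion_spec : Claim_equal_calculateTotalRegion := by
  intro heights _
  unfold Spec_calculateTotalRegion
  simp only [calculateTotalRegion, calculateTotalRegion_alt]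
  apply List.foldl_ext
  intro t i hi
  have hi' : i < heights.length := List.mem_range.mp hi
  rw [leftArr_spec heights heights.length i hi',
    rightArr_spec heights heights.length i hi']
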